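-- pv_equiv track=rewrite | github.com/zh805/algorithm | leetcode/python/leetcode/editor/cn/[1807]替换字符串中的括号内容.py | evaluate
-- ===== SOURCE A (Python) =====
-- from typing import List
--
-- def evaluate(s: str, knowledge: List[List[str]]) -> str:
--     d = dict()
--     for k in knowledge:
--         d[k[0]] = k[1]
--
--     res = ''
--     n = len(s)
--     i = 0
--     while i < n:
--         if s[i] == '(':
--             j = i
--             while j < n and s[j] != ')':
--                 j += 1
--             key = s[i+1:j]
--             if key in d:
--                 res += d[key]
--             else:
--                 res += '?'
--             i = j + 1
--         else:
--             res += s[i]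
--             i += 1
--
--     return res
-- ===== SOURCE B (Python) =====
-- def evaluate(s, knowledge):
--     d = {k[0]: k[1] for k in knowledge}
--
--     def go(t):
--         p = t.find('(')
--         if p < 0:
--             return t
--         head, tail = t[:p], t[p + 1:]
--         q = tail.find(')')
--         if q < 0:
--             return head + d.get(tail, '?')
--         return head + d.get(tail[:q], '?') + go(tail[q + 1:])
--
--     return go(s)
-- ===== Notes on version B (the rewrite author's own statement) =====
-- stated objective: simpler
-- what changed: Replaced A's char-by-char while-loop with manual index jumping and string concatenation by a short recursion on the suffix that delegates searching to str.find and uses slices and dict.get with a default.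
import Mathlib
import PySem

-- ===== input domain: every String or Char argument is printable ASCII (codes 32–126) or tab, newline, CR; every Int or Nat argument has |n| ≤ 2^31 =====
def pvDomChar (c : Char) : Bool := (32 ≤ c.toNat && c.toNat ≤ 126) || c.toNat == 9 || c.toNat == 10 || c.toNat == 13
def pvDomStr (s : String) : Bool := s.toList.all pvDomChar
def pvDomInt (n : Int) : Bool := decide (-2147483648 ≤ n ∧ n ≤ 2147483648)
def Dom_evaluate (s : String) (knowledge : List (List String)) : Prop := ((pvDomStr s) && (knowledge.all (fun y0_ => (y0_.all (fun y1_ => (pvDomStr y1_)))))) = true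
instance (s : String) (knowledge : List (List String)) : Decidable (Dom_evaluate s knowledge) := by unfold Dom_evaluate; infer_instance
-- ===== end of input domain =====

-- B replaces A's char-by-char index loop by a recursion on the suffix using str.find and
-- slices (objective: simpler/more idiomatic); return values agree on all of Pre_.

-- ===== PORT A =====
-- inner scan: `while j < n and s[j] != ')': j += 1`
theorem pvDecAux (n i j : Nat) (h : i < n) (hij : i ≤ j) : n - (j + 1) < n - i := by omega

def pvScanA (cs : List Char) (j : Nat) : Nat :=
  if _h : j < cs.length then
    if cs.getD j ' ' ≠ ')' then pvScanA cs (j + 1) else j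
  else j
termination_by cs.length - j
decreasing_by exact pvDecAux cs.length j j _h (Nat.le_refl j)

-- needed only for `pvLoopA`'s termination
theorem pvScanA_ge (cs : List Char) (j : Nat) : j ≤ pvScanA cs j := by
  fun_induction pvScanA cs j with
  | case1 j _ _ ih => omega
  | case2 => omega
  | case3 => omega

-- outer while-loop of A, state (i, res)
def pvLoopA (d : PySem.Dict String String) (cs : List Char) (i : Nat) (res : List Char) :
    List Char :=
  if _h : i < cs.length then
    if cs.getD i ' ' = '(' then
      let j := pvScanA cs i
      let key := String.ofList (PySem.List.slice cs (some ((i : Int) + 1)) (some (j : Int)))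
      if d.contains key then pvLoopA d cs (j + 1) (res ++ (d.getD key "?").toList)
      else pvLoopA d cs (j + 1) (res ++ ['?'])
    else pvLoopA d cs (i + 1) (res ++ [cs.getD i ' '])
  else res
termination_by cs.length - i
decreasing_by
  · exact pvDecAux cs.length i (pvScanA cs i) _h (pvScanA_ge cs i)
  · exact pvDecAux cs.length i (pvScanA cs i) _h (pvScanA_ge cs i)
  · exact pvDecAux cs.length i i _h (Nat.le_refl i)

def evaluate (s : String) (knowledge : List (List String)) : String :=
  let d := knowledge.foldl
    (fun d k => d.insert (PySem.List.pyGetD k 0 "") (PySem.List.pyGetD k 1 "")) PySem.Dict.empty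
  String.ofList (pvLoopA d s.toList 0 [])

-- ===== PORT B =====
-- Source B's recursive `go`: find '(' and the next ')', slice, look up, recurse on the rest
theorem pvGoB_dec (t : List Char) (hp : ¬ PySem.Chars.find t ['('] < 0) :
    (PySem.List.slice (PySem.List.slice t (some (PySem.Chars.find t ['('] + 1)) none)
        (some (PySem.Chars.find
          (PySem.List.slice t (some (PySem.Chars.find t ['('] + 1)) none) [')'] + 1)) none).length
      < t.length := by
  have hp0 : (0 : Int) ≤ PySem.Chars.find t ['('] := by omega
  obtain ⟨hpre, -⟩ := PySem.Chars.find_spec hp0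
  have hne : t.drop (PySem.Chars.find t ['(']).toNat ≠ [] := by
    intro h; rw [h] at hpre; simp at hpre
  have hlt : (PySem.Chars.find t ['(']).toNat < t.length := by
    by_contra h; exact hne (List.drop_eq_nil_of_le (by omega))
  rw [show PySem.Chars.find t ['('] + 1 = (((PySem.Chars.find t ['(']).toNat + 1 : Nat) : Int)
        by omega,
      PySem.List.slice_from_natCast, PySem.List.slice_some_none]
  simp only [List.length_drop]
  omega

def pvGoB (d : PySem.Dict String String) (t : List Char) : List Char :=
  let p := PySem.Chars.find t ['(']
  if _hp : p < 0 then t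
  else
    let head := PySem.List.slice t none (some p)
    let tail := PySem.List.slice t (some (p + 1)) none
    let q := PySem.Chars.find tail [')']
    if q < 0 then head ++ (d.getD (String.ofList tail) "?").toList
    else head ++ (d.getD (String.ofList (PySem.List.slice tail none (some q))) "?").toList
          ++ pvGoB d (PySem.List.slice tail (some (q + 1)) none)
termination_by t.length
decreasing_by exact pvGoB_dec t _hp

def evaluate_alt (s : String) (knowledge : List (List String)) : String :=
  let d := knowledge.foldl
    (fun d k => d.insert (PySem.List.pyGetD k 0 "") (PySem.List.pyGetD k 1 "")) PySem.Dict.empty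
  String.ofList (pvGoB d s.toList)

-- ===== PRECONDITION & SPEC =====
-- Pre_ excludes knowledge entries shorter than two strings: A raises IndexError on k[0]/k[1] there.
def Pre_evaluate (s : String) (knowledge : List (List String)) : Prop :=
  ∀ k ∈ knowledge, 2 ≤ k.length
instance (s : String) (knowledge : List (List String)) : Decidable (Pre_evaluate s knowledge) := by
  unfold Pre_evaluate; infer_instance

def pvWitness_evaluate : String × List (List String) := ("hi(a)x", [["a", "b"]])

def Spec_evaluate (s : String) (knowledge : List (List String)) (out : String) : Prop :=
  out = evaluate_alt s knowledge
instance (s : String) (knowledge : List (List String)) (out : String) :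
    Decidable (Spec_evaluate s knowledge out) := by unfold Spec_evaluate; infer_instance

-- ===== CLAIM (what is proved, stated in full; the proofs are below) =====
def Claim_equal_evaluate : Prop := ∀ (s : String) (knowledge : List (List String)),
  Dom_evaluate s knowledge → Pre_evaluate s knowledge →
  Spec_evaluate s knowledge (evaluate s knowledge)

-- ===== LEMMAS AND PROOFS =====

theorem pv_find_single_neg (t : List Char) (c : Char) :
    PySem.Chars.find t [c] < 0 ↔ c ∉ t := by
  have h1 := PySem.Chars.neg_one_le_find t [c]
  have h2 := PySem.Chars.find_eq_neg_one_iff t [c]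
  rw [List.singleton_infix_iff] at h2
  constructor
  · intro h; exact h2.mp (by omega)
  · intro h; have := h2.mpr h; omega

theorem pv_drop_single_prefix (t : List Char) (i : Nat) (c : Char) :
    [c] <+: t.drop i ↔ t[i]? = some c := by
  constructor
  · rintro ⟨rest, hr⟩
    have h0 : (t.drop i)[0]? = some c := by rw [← hr]; rfl
    rwa [List.getElem?_drop, Nat.add_zero] at h0
  · intro h
    have hi : i < t.length := by
      by_contra hh
      rw [List.getElem?_eq_none (by omega)] at h; simp at h
    have hv : t[i] = c := by
      have := List.getElem?_eq_getElem hi; rw [this] at h; exact Option.some.inj h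
    exact ⟨t.drop (i + 1), by rw [List.drop_eq_getElem_cons hi, hv]; rfl⟩

theorem pv_find_single_mem (t : List Char) (c : Char) (h : c ∈ t) :
    PySem.Chars.find t [c] = (t.findIdx (· = c) : Int) := by
  have h0 : (0 : Int) ≤ PySem.Chars.find t [c] := by
    by_contra hh
    exact (pv_find_single_neg t c).mp (by omega) h
  obtain ⟨hpre, hmin⟩ := PySem.Chars.find_spec h0
  have hk : t[(PySem.Chars.find t [c]).toNat]? = some c := (pv_drop_single_prefix _ _ _).mp hpre
  have hklt : (PySem.Chars.find t [c]).toNat < t.length := by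
    by_contra hh
    rw [List.getElem?_eq_none (by omega)] at hk; simp at hk
  have hfi : t.findIdx (· = c) = (PySem.Chars.find t [c]).toNat := by
    apply Nat.le_antisymm
    · by_contra hh
      have := List.not_of_lt_findIdx (xs := t) (p := (· = c)) (i := (PySem.Chars.find t [c]).toNat)
        (by omega)
      rw [List.getElem?_eq_getElem hklt] at hk
      have hv := Option.some.inj hk
      exact absurd hv (by simpa using this)
    · by_contra hh
      have hlt : t.findIdx (· = c) < t.length := by omega
      have hp := List.findIdx_getElem (xs := t) (p := (· = c)) (w := hlt)
      have : [c] <+: t.drop (t.findIdx (· = c)) := by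
        rw [pv_drop_single_prefix, List.getElem?_eq_getElem hlt]
        simpa using hp
      exact hmin _ (by omega) this
  rw [hfi, Int.toNat_of_nonneg h0]

theorem pvGoB_nil (d : PySem.Dict String String) : pvGoB d [] = [] := by
  have h : PySem.Chars.find ([] : List Char) ['('] < 0 := (pv_find_single_neg _ _).mpr (by simp)
  rw [pvGoB]; simp [h]

theorem pvGoB_cons_ne (d : PySem.Dict String String) (c : Char) (t : List Char) (hc : c ≠ '(') :
    pvGoB d (c :: t) = c :: pvGoB d t := by
  by_cases hm : '(' ∈ t
  · have h2 : PySem.Chars.find t ['('] = (t.findIdx (· = '(') : Int) := pv_find_single_mem t _ hm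
    have h1 : PySem.Chars.find (c :: t) ['('] = ((t.findIdx (· = '(') : Nat) + 1 : Int) := by
      rw [pv_find_single_mem (c :: t) _ (by simp [hm]), List.findIdx_cons]
      simp [hc]
    conv_lhs => rw [pvGoB]
    conv_rhs => rw [pvGoB]
    rw [h1, h2]
    have hng : ¬ ((t.findIdx (· = '(') : Nat) + 1 : Int) < 0 := by omega
    have hng2 : ¬ ((t.findIdx (· = '(') : Nat) : Int) < 0 := by omega
    simp only [hng, hng2]
    have hhead : PySem.List.slice (c :: t) none (some ((t.findIdx (· = '(') : Nat) + 1 : Int))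
        = c :: PySem.List.slice t none (some ((t.findIdx (· = '(') : Nat) : Int)) := by
      rw [show ((t.findIdx (· = '(') : Nat) + 1 : Int) = ((t.findIdx (· = '(') + 1 : Nat) : Int)
            by push_cast; ring,
          PySem.List.slice_to_natCast, PySem.List.slice_to_natCast]
      rfl
    have htail : PySem.List.slice (c :: t) (some (((t.findIdx (· = '(') : Nat) + 1 : Int) + 1)) none
        = PySem.List.slice t (some (((t.findIdx (· = '(') : Nat) : Int) + 1)) none := by
      rw [show (((t.findIdx (· = '(') : Nat) + 1 : Int) + 1) = ((t.findIdx (· = '(') + 2 : Nat) : Int)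
            by push_cast; ring,
          show (((t.findIdx (· = '(') : Nat) : Int) + 1) = ((t.findIdx (· = '(') + 1 : Nat) : Int)
            by push_cast; ring,
          PySem.List.slice_from_natCast, PySem.List.slice_from_natCast]
      rfl
    rw [hhead, htail]
    split_ifs <;> simp
  · have hA : PySem.Chars.find (c :: t) ['('] < 0 :=
      (pv_find_single_neg _ _).mpr (by simp [hm, Ne.symm hc])
    have hB : PySem.Chars.find t ['('] < 0 := (pv_find_single_neg _ _).mpr hm
    conv_lhs => rw [pvGoB]
    conv_rhs => rw [pvGoB]
    simp [hA, hB]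

theorem pvGoB_open (d : PySem.Dict String String) (t : List Char) :
    pvGoB d ('(' :: t) =
      if ')' ∈ t then
        (d.getD (String.ofList (t.take (t.findIdx (· = ')')))) "?").toList
          ++ pvGoB d (t.drop (t.findIdx (· = ')') + 1))
      else (d.getD (String.ofList t) "?").toList := by
  conv_lhs => rw [pvGoB]
  have h1 : PySem.Chars.find ('(' :: t) ['('] = ((0 : Nat) : Int) := by
    rw [pv_find_single_mem ('(' :: t) _ (by simp), List.findIdx_cons]; simp
  rw [h1]
  have hng : ¬ ((0 : Nat) : Int) < 0 := by omega
  simp only [hng]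
  have hhead : PySem.List.slice ('(' :: t) none (some ((0 : Nat) : Int)) = [] := by
    rw [PySem.List.slice_to_natCast]; rfl
  have htail : PySem.List.slice ('(' :: t) (some (((0 : Nat) : Int) + 1)) none = t := by
    rw [show (((0 : Nat) : Int) + 1) = ((1 : Nat) : Int) by norm_num,
        PySem.List.slice_from_natCast]
    rfl
  rw [hhead, htail]
  by_cases hm : ')' ∈ t
  · have hq : PySem.Chars.find t [')'] = (t.findIdx (· = ')') : Int) := pv_find_single_mem t _ hm
    have hng2 : ¬ (t.findIdx (· = ')') : Int) < 0 := by omega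
    rw [hq, if_neg hng2, if_pos hm]
    rw [PySem.List.slice_to_natCast]
    rw [show ((t.findIdx (· = ')') : Nat) : Int) + 1 = ((t.findIdx (· = ')') + 1 : Nat) : Int)
          by push_cast; ring]
    rw [PySem.List.slice_from_natCast]
    simp
  · have hq : PySem.Chars.find t [')'] < 0 := (pv_find_single_neg _ _).mpr hm
    rw [if_pos hq, if_neg hm]
    simp

theorem pvScanA_eq (cs : List Char) (j : Nat) :
    pvScanA cs j = j + (cs.drop j).findIdx (· = ')') := by
  fun_induction pvScanA cs j with
  | case1 j h hne ih =>
    rw [ih, List.drop_eq_getElem_cons h, List.findIdx_cons]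
    have : cs.getD j ' ' = cs[j] := List.getD_eq_getElem cs ' ' h
    rw [this] at hne
    simp [hne]
    omega
  | case2 j h hne =>
    rw [List.drop_eq_getElem_cons h, List.findIdx_cons]
    have : cs.getD j ' ' = cs[j] := List.getD_eq_getElem cs ' ' h
    rw [this] at hne
    simp at hne
    simp [hne]
  | case3 j h =>
    rw [List.drop_eq_nil_of_le (by omega)]
    simp

theorem pvLoopA_eq (d : PySem.Dict String String) (cs : List Char) (i : Nat) (res : List Char) :
    pvLoopA d cs i res = res ++ pvGoB d (cs.drop i) := by
  fun_induction pvLoopA d cs i res with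
  | case1 i res h hopen j key hc ih =>
    rw [ih]
    have hget : cs.getD i ' ' = cs[i] := List.getD_eq_getElem cs ' ' h
    have hdrop : cs.drop i = '(' :: cs.drop (i + 1) := by
      rw [List.drop_eq_getElem_cons h, ← hget, hopen]
    have hj : j = i + 1 + (cs.drop (i + 1)).findIdx (· = ')') := by
      show pvScanA cs i = _
      rw [pvScanA_eq cs i, hdrop, List.findIdx_cons]
      have hd : decide ('(' = ')') = false := rfl
      rw [hd]
      simp only [cond_false]
      omega
    rw [hdrop, pvGoB_open]
    by_cases hm : ')' ∈ cs.drop (i + 1)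
    · rw [if_pos hm]
      have hkey : key = String.ofList ((cs.drop (i + 1)).take ((cs.drop (i + 1)).findIdx (· = ')'))) := by
        show String.ofList _ = _
        rw [show ((i : Int) + 1) = ((i + 1 : Nat) : Int) by push_cast; ring,
            show ((j : Nat) : Int) = ((i + 1 + (cs.drop (i + 1)).findIdx (· = ')') : Nat) : Int)
              by rw [hj],
            PySem.List.slice_natCast, Nat.add_sub_cancel_left]
      have hdrop2 : (cs.drop (i + 1)).drop ((cs.drop (i + 1)).findIdx (· = ')') + 1)
          = cs.drop (j + 1) := by
        rw [List.drop_drop]; congr 1; omega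
      rw [hkey, hdrop2, List.append_assoc]
    · rw [if_neg hm]
      have hfi : (cs.drop (i + 1)).findIdx (· = ')') = (cs.drop (i + 1)).length :=
        List.findIdx_eq_length.mpr (by
          intro x hx
          simp only [decide_eq_false_iff_not]
          intro h'
          exact hm (h' ▸ hx))
      have hlen : (cs.drop (i + 1)).length = cs.length - (i + 1) := List.length_drop
      have hkey : key = String.ofList (cs.drop (i + 1)) := by
        show String.ofList _ = _
        rw [show ((i : Int) + 1) = ((i + 1 : Nat) : Int) by push_cast; ring,
            show ((j : Nat) : Int) = ((i + 1 + (cs.drop (i + 1)).findIdx (· = ')') : Nat) : Int)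
              by rw [hj],
            PySem.List.slice_natCast, Nat.add_sub_cancel_left, hfi, List.take_length]
      have hdrop2 : cs.drop (j + 1) = [] := List.drop_eq_nil_of_le (by omega)
      rw [hkey, hdrop2, pvGoB_nil, List.append_nil]
  | case2 i res h hopen j key hc ih =>
    rw [ih]
    have hget : cs.getD i ' ' = cs[i] := List.getD_eq_getElem cs ' ' h
    have hdrop : cs.drop i = '(' :: cs.drop (i + 1) := by
      rw [List.drop_eq_getElem_cons h, ← hget, hopen]
    have hj : j = i + 1 + (cs.drop (i + 1)).findIdx (· = ')') := by
      show pvScanA cs i = _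
      rw [pvScanA_eq cs i, hdrop, List.findIdx_cons]
      have hd : decide ('(' = ')') = false := rfl
      rw [hd]
      simp only [cond_false]
      omega
    have hmark : (['?'] : List Char) = (d.getD key "?").toList := by
      rw [PySem.Dict.getD_of_not_contains d "?" (by simpa using hc)]
      decide
    rw [hmark, hdrop, pvGoB_open]
    by_cases hm : ')' ∈ cs.drop (i + 1)
    · rw [if_pos hm]
      have hkey : key = String.ofList ((cs.drop (i + 1)).take ((cs.drop (i + 1)).findIdx (· = ')'))) := by
        show String.ofList _ = _
        rw [show ((i : Int) + 1) = ((i + 1 : Nat) : Int) by push_cast; ring,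
            show ((j : Nat) : Int) = ((i + 1 + (cs.drop (i + 1)).findIdx (· = ')') : Nat) : Int)
              by rw [hj],
            PySem.List.slice_natCast, Nat.add_sub_cancel_left]
      have hdrop2 : (cs.drop (i + 1)).drop ((cs.drop (i + 1)).findIdx (· = ')') + 1)
          = cs.drop (j + 1) := by
        rw [List.drop_drop]; congr 1; omega
      rw [hkey, hdrop2, List.append_assoc]
    · rw [if_neg hm]
      have hfi : (cs.drop (i + 1)).findIdx (· = ')') = (cs.drop (i + 1)).length :=
        List.findIdx_eq_length.mpr (by
          intro x hx
          simp only [decide_eq_false_iff_not]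
          intro h'
          exact hm (h' ▸ hx))
      have hlen : (cs.drop (i + 1)).length = cs.length - (i + 1) := List.length_drop
      have hkey : key = String.ofList (cs.drop (i + 1)) := by
        show String.ofList _ = _
        rw [show ((i : Int) + 1) = ((i + 1 : Nat) : Int) by push_cast; ring,
            show ((j : Nat) : Int) = ((i + 1 + (cs.drop (i + 1)).findIdx (· = ')') : Nat) : Int)
              by rw [hj],
            PySem.List.slice_natCast, Nat.add_sub_cancel_left, hfi, List.take_length]
      have hdrop2 : cs.drop (j + 1) = [] := List.drop_eq_nil_of_le (by omega)
      rw [hkey, hdrop2, pvGoB_nil, List.append_nil]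
  | case3 i res h hopen ih =>
    rw [ih]
    have hget : cs.getD i ' ' = cs[i] := List.getD_eq_getElem cs ' ' h
    have hdrop : cs.drop i = cs[i] :: cs.drop (i + 1) := List.drop_eq_getElem_cons h
    rw [hdrop, pvGoB_cons_ne d _ _ (by rw [← hget]; exact hopen), hget]
    simp
  | case4 i res h =>
    rw [List.drop_eq_nil_of_le (by omega), pvGoB_nil, List.append_nil]

-- ===== VERDICT (by name: the statement is the Claim_ definition above) =====
theorem evaluate_spec : Claim_equal_evaluate := by
  intro s knowledge _ _
  show evaluate s knowledge = evaluate_alt s knowledge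
  simp [evaluate, evaluate_alt, pvLoopA_eq]
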